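-- pv_equiv track=rewrite | github.com/jinyongp/write-code-everyday | programmers/PART17/모의고사.py | solution
-- ===== SOURCE A (Python) =====
-- def solution(answers):
--     p = [
--         [1, 2, 3, 4, 5],
--         [2, 1, 2, 3, 2, 4, 2, 5],
--         [3, 3, 1, 1, 2, 2, 4, 4, 5, 5]
--     ]
--
--     counts = [0, 0, 0]
--     for i, answer in enumerate(answers):
--         if p[0][i % len(p[0])] == answer:
--             counts[0] += 1
--         if p[1][i % len(p[1])] == answer:
--             counts[1] += 1
--         if p[2][i % len(p[2])] == answer:
--             counts[2] += 1
--
--     answer = []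
--     for i, count in enumerate(counts):
--         if count == max(counts):
--             answer.append(i + 1)
--
--     return answer
-- ===== SOURCE B (Python) =====
-- from collections import Counter
--
-- def solution(answers):
--     P = 40  # lcm of the three pattern periods (5, 8, 10)
--     # one pass: histogram of (position mod P, given answer)
--     hist = Counter((i % P, a) for i, a in enumerate(answers))
--     def score(pat):
--         return sum(hist[(r, pat[r % len(pat)])] for r in range(P))
--     counts = [score([1, 2, 3, 4, 5]),
--               score([2, 1, 2, 3, 2, 4, 2, 5]),
--               score([3, 3, 1, 1, 2, 2, 4, 4, 5, 5])]
--     best = max(counts)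
--     return [k + 1 for k in range(3) if counts[k] == best]
-- ===== Notes on version B (the rewrite author's own statement) =====
-- stated objective: alternative
-- what changed: A makes one interleaved pass over the answers with three modular-index comparisons per element; B instead builds a Counter histogram keyed by (position mod 40, answer) in a single pass (40 = lcm of the pattern periods) and then scores each pattern against the 40-slot histogram without rescanning the answers, so pattern scoring is O(1) per pattern slot instead of O(n).
import Mathlib
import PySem

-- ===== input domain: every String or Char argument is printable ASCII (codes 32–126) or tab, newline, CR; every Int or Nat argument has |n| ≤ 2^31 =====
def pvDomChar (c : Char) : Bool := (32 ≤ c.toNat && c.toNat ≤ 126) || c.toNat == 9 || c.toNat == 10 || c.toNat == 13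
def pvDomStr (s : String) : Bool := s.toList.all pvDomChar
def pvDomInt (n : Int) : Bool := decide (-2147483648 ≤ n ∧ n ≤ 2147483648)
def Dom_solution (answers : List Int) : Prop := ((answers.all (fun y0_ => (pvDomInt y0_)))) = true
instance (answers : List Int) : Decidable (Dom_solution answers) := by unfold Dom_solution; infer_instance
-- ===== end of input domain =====

-- B replaces A's interleaved triple-counter pass by a one-pass histogram keyed by
-- (position mod 40, answer) that each pattern is then scored against (objective: alternative).

-- ===== PORT A =====
def solution (answers : List Int) : List Int :=
  let p0 : List Int := [1, 2, 3, 4, 5]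
  let p1 : List Int := [2, 1, 2, 3, 2, 4, 2, 5]
  let p2 : List Int := [3, 3, 1, 1, 2, 2, 4, 4, 5, 5]
  let counts :=
    (PySem.List.enumerate answers 0).foldl
      (fun (c : Int × Int × Int) ia =>
        let c0 := if PySem.List.pyGetD p0 (PySem.Int.mod ia.1 (PySem.List.len p0)) 0 = ia.2 then c.1 + 1 else c.1
        let c1 := if PySem.List.pyGetD p1 (PySem.Int.mod ia.1 (PySem.List.len p1)) 0 = ia.2 then c.2.1 + 1 else c.2.1
        let c2 := if PySem.List.pyGetD p2 (PySem.Int.mod ia.1 (PySem.List.len p2)) 0 = ia.2 then c.2.2 + 1 else c.2.2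
        (c0, c1, c2))
      (0, 0, 0)
  let cs : List Int := [counts.1, counts.2.1, counts.2.2]
  let m := (PySem.List.max? cs (fun y => y)).getD 0
  (PySem.List.enumerate cs 0).foldl (fun acc ic => if ic.2 = m then acc ++ [ic.1 + 1] else acc) []

-- ===== PORT B =====
-- Counter((i % 40, a) for i, a in enumerate(answers))
def histOf (answers : List Int) : PySem.Dict (Int × Int) Int :=
  PySem.Dict.counter ((PySem.List.enumerate answers 0).map (fun ia => (PySem.Int.mod ia.1 40, ia.2)))

-- sum(hist[(r, pat[r % len(pat)])] for r in range(40))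
def score (hist : PySem.Dict (Int × Int) Int) (pat : List Int) : Int :=
  ((PySem.List.pyRange 0 40 1).map
    (fun r => hist.getD (r, PySem.List.pyGetD pat (PySem.Int.mod r (PySem.List.len pat)) 0) 0)).sum

def solution_alt (answers : List Int) : List Int :=
  let hist := histOf answers
  let counts : List Int :=
    [score hist [1, 2, 3, 4, 5],
     score hist [2, 1, 2, 3, 2, 4, 2, 5],
     score hist [3, 3, 1, 1, 2, 2, 4, 4, 5, 5]]
  let best := (PySem.List.max? counts (fun y => y)).getD 0
  (PySem.List.pyRange 0 3 1).filterMap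
    (fun k => if PySem.List.pyGetD counts k 0 = best then some (k + 1) else none)

-- ===== PRECONDITION & SPEC =====
def Spec_solution (answers : List Int) (out : List Int) : Prop := out = solution_alt answers
instance (answers : List Int) (out : List Int) : Decidable (Spec_solution answers out) := by unfold Spec_solution; infer_instance

-- ===== CLAIM (what is proved, stated in full; the proofs are below) =====
def Claim_equal_solution : Prop := ∀ (answers : List Int), Dom_solution answers → Spec_solution answers (solution answers)

-- ===== LEMMAS AND PROOFS =====

-- common specification of one pattern's match count, starting at position s
def cnt (p : List Int) (s : Nat) (l : List Int) : Int :=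
  match l with
  | [] => 0
  | a :: t => (if p.getD (s % p.length) 0 = a then (1 : Int) else 0) + cnt p (s + 1) t

theorem pyGetD_mod (p : List Int) (s : Nat) :
    PySem.List.pyGetD p (PySem.Int.mod (s : Int) (PySem.List.len p)) 0 = p.getD (s % p.length) 0 := by
  have h : PySem.Int.mod (s : Int) (PySem.List.len p) = ((s % p.length : Nat) : Int) := by
    rw [PySem.List.len_eq]; exact PySem.Int.mod_natCast s p.length
  rw [h, PySem.List.pyGetD_natCast]

theorem A_fold (l : List Int) : ∀ (s : Nat) (x y z : Int),
    (PySem.List.enumerate l (s : Int)).foldl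
      (fun (c : Int × Int × Int) ia =>
        (if PySem.List.pyGetD [1,2,3,4,5] (PySem.Int.mod ia.1 (PySem.List.len [(1:Int),2,3,4,5])) 0 = ia.2 then c.1 + 1 else c.1,
         if PySem.List.pyGetD [2,1,2,3,2,4,2,5] (PySem.Int.mod ia.1 (PySem.List.len [(2:Int),1,2,3,2,4,2,5])) 0 = ia.2 then c.2.1 + 1 else c.2.1,
         if PySem.List.pyGetD [3,3,1,1,2,2,4,4,5,5] (PySem.Int.mod ia.1 (PySem.List.len [(3:Int),3,1,1,2,2,4,4,5,5])) 0 = ia.2 then c.2.2 + 1 else c.2.2))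
      (x, y, z)
    = (x + cnt [1,2,3,4,5] s l, y + cnt [2,1,2,3,2,4,2,5] s l, z + cnt [3,3,1,1,2,2,4,4,5,5] s l) := by
  induction l with
  | nil => intro s x y z; simp [PySem.List.enumerate_nil, cnt]
  | cons a t ih =>
    intro s x y z
    rw [PySem.List.enumerate_cons]
    rw [List.foldl_cons]
    have hs1 : ((s : Int) + 1) = ((s + 1 : Nat) : Int) := by push_cast; ring
    rw [hs1, ih (s + 1)]
    simp only [pyGetD_mod, cnt]
    split_ifs <;> refine Prod.ext ?_ (Prod.ext ?_ ?_) <;> simp <;> ring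

-- the (position mod 40, answer) pairs B histograms, starting at index s
def tagged (l : List Int) (s : Nat) : List (Int × Int) :=
  (PySem.List.enumerate l (s : Int)).map (fun ia => (PySem.Int.mod ia.1 40, ia.2))

theorem tagged_nil (s : Nat) : tagged [] s = [] := by
  simp [tagged, PySem.List.enumerate_nil]

theorem tagged_cons (a : Int) (t : List Int) (s : Nat) :
    tagged (a :: t) s = (((s % 40 : Nat) : Int), a) :: tagged t (s + 1) := by
  unfold tagged
  rw [PySem.List.enumerate_cons, List.map_cons]
  have hs1 : ((s : Int) + 1) = ((s + 1 : Nat) : Int) := by push_cast; ring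
  rw [hs1]
  have h : PySem.Int.mod (s : Int) 40 = ((s % 40 : Nat) : Int) := PySem.Int.mod_natCast s 40
  rw [h]

-- one summand of the indicator sum collapses by Finset.sum_ite_eq'
theorem ind_sum (pat : List Int) (hd : pat.length ∣ 40) (s : Nat) (a : Int) :
    ((List.range 40).map (fun k =>
        (if ((((s % 40 : Nat) : Int), a) = (((k : Nat) : Int), pat.getD (k % pat.length) 0)) then (1 : Int) else 0))).sum
    = if pat.getD (s % pat.length) 0 = a then (1 : Int) else 0 := by
  rw [show ((List.range 40).map (fun k =>
        (if ((((s % 40 : Nat) : Int), a) = (((k : Nat) : Int), pat.getD (k % pat.length) 0)) then (1 : Int) else 0))).sum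
      = ∑ k ∈ Finset.range 40,
        (if ((((s % 40 : Nat) : Int), a) = (((k : Nat) : Int), pat.getD (k % pat.length) 0)) then (1 : Int) else 0) from rfl]
  have hmem : s % 40 ∈ Finset.range 40 := Finset.mem_range.mpr (Nat.mod_lt s (by norm_num))
  have hpt : ∀ k ∈ Finset.range 40,
      (if ((((s % 40 : Nat) : Int), a) = (((k : Nat) : Int), pat.getD (k % pat.length) 0)) then (1 : Int) else 0)
      = if k = s % 40 then (if pat.getD (s % pat.length) 0 = a then (1 : Int) else 0) else 0 := by
    intro k _
    by_cases hk : k = s % 40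
    · subst hk
      rw [Nat.mod_mod_of_dvd s hd]
      simp [Prod.ext_iff, eq_comm]
    · have hif1 : ¬ ((((s % 40 : Nat) : Int), a) = (((k : Nat) : Int), pat.getD (k % pat.length) 0)) := by
        intro h
        have h1 : ((s % 40 : Nat) : Int) = ((k : Nat) : Int) := congrArg Prod.fst h
        exact hk (Int.natCast_inj.mp h1).symm
      rw [if_neg hif1, if_neg hk]
  rw [Finset.sum_congr rfl hpt, Finset.sum_ite_eq' (Finset.range 40) (s % 40)]
  simp [hmem]

theorem hist_sum (pat : List Int) (hd : pat.length ∣ 40) :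
    ∀ (l : List Int) (s : Nat),
    ((List.range 40).map (fun k =>
        ((tagged l s).count (((k : Nat) : Int), pat.getD (k % pat.length) 0) : Int))).sum
    = cnt pat s l := by
  intro l
  induction l with
  | nil => intro s; simp [tagged_nil, cnt]
  | cons a t ih =>
    intro s
    rw [show cnt pat s (a :: t) = (if pat.getD (s % pat.length) 0 = a then (1 : Int) else 0) + cnt pat (s+1) t from rfl]
    have hcount : ∀ k : Nat,
        ((tagged (a :: t) s).count (((k : Nat) : Int), pat.getD (k % pat.length) 0) : Int)
        = ((tagged t (s+1)).count (((k : Nat) : Int), pat.getD (k % pat.length) 0) : Int)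
          + (if ((((s % 40 : Nat) : Int), a) = (((k : Nat) : Int), pat.getD (k % pat.length) 0)) then (1 : Int) else 0) := by
      intro k
      rw [tagged_cons, List.count_cons]
      simp only [beq_iff_eq]
      push_cast
      split_ifs <;> ring
    calc ((List.range 40).map (fun k =>
            ((tagged (a :: t) s).count (((k : Nat) : Int), pat.getD (k % pat.length) 0) : Int))).sum
        = ((List.range 40).map (fun k =>
            ((tagged t (s+1)).count (((k : Nat) : Int), pat.getD (k % pat.length) 0) : Int)
            + (if ((((s % 40 : Nat) : Int), a) = (((k : Nat) : Int), pat.getD (k % pat.length) 0)) then (1 : Int) else 0))).sum := by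
          exact congrArg List.sum (List.map_congr_left (fun k _ => hcount k))
      _ = ((List.range 40).map (fun k =>
            ((tagged t (s+1)).count (((k : Nat) : Int), pat.getD (k % pat.length) 0) : Int))).sum
          + ((List.range 40).map (fun k =>
            (if ((((s % 40 : Nat) : Int), a) = (((k : Nat) : Int), pat.getD (k % pat.length) 0)) then (1 : Int) else 0))).sum := by
          rw [← List.sum_map_add]
      _ = cnt pat (s+1) t + (if pat.getD (s % pat.length) 0 = a then (1 : Int) else 0) := by
          rw [ih (s+1), ind_sum pat hd s a]
      _ = _ := by ring

theorem score_eq_cnt (answers pat : List Int) (hd : pat.length ∣ 40) :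
    score (histOf answers) pat = cnt pat 0 answers := by
  have htag : (PySem.List.enumerate answers 0).map (fun ia => (PySem.Int.mod ia.1 40, ia.2))
      = tagged answers 0 := by simp [tagged]
  unfold score histOf
  rw [htag, PySem.List.pyRange_one, List.map_map]
  rw [show ((40 : Int) - 0).toNat = 40 from rfl, ← hist_sum pat hd answers 0]
  congr 1
  apply List.map_congr_left
  intro k _
  show (PySem.Dict.counter (tagged answers 0)).getD
      ((0 : Int) + (k : Int), PySem.List.pyGetD pat (PySem.Int.mod ((0 : Int) + (k : Int)) (PySem.List.len pat)) 0) 0 = _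
  rw [zero_add, pyGetD_mod pat k, PySem.Dict.getD_counter]

-- ===== VERDICT (by name: the statement is the Claim_ definition above) =====
theorem solution_spec : Claim_equal_solution := by
  intro answers _
  unfold Spec_solution solution solution_alt
  simp only []
  have hA := A_fold answers 0 0 0 0
  simp only [Nat.cast_zero] at hA
  rw [hA]
  rw [score_eq_cnt answers [1,2,3,4,5] (by norm_num),
      score_eq_cnt answers [2,1,2,3,2,4,2,5] (by norm_num),
      score_eq_cnt answers [3,3,1,1,2,2,4,4,5,5] (by norm_num)]
  simp only [zero_add]
  generalize cnt [1,2,3,4,5] 0 answers = a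
  generalize cnt [2,1,2,3,2,4,2,5] 0 answers = b
  generalize cnt [3,3,1,1,2,2,4,4,5,5] 0 answers = c
  simp only [PySem.List.enumerate_cons, PySem.List.enumerate_nil, List.foldl_cons,
    List.foldl_nil]
  have h3 : PySem.List.pyRange 0 3 1 = [0, 1, 2] := by decide
  rw [h3]
  simp only [List.filterMap_cons, List.filterMap_nil]
  norm_num [PySem.List.pyGetD_ofNat']
  split_ifs <;> simp
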